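-- pv_equiv track=rewrite | github.com/tsani/coding-cat-public | remove-vowels-once/mutation_1.py | remove_vowels_once
-- ===== SOURCE A (Python) =====
-- def remove_vowels_once(word: str) -> str:
--     '''
--     Missing the capital vowels
--     '''
--     vowels = "aeiouy"
--     seen_vowels = set()
--     result = []
--     for char in word:
--         if char in vowels:
--             if char not in seen_vowels:
--                 seen_vowels.add(char)
--             else:
--                 result.append(char)
--         else:
--             result.append(char)
--     return ''.join(result)
-- ===== SOURCE B (Python) =====
-- def remove_vowels_once(word: str) -> str:
--     delete = {word.index(v) for v in "aeiouy" if v in word}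
--     return ''.join(c for i, c in enumerate(word) if i not in delete)
-- ===== Notes on version B (the rewrite author's own statement) =====
-- stated objective: alternative
-- what changed: Replaces the streaming scan with a seen-set by a two-phase plan: first build the set of first-occurrence indices of the vowels present (word.index per vowel), then filter the enumerated string by index.
import Mathlib
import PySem

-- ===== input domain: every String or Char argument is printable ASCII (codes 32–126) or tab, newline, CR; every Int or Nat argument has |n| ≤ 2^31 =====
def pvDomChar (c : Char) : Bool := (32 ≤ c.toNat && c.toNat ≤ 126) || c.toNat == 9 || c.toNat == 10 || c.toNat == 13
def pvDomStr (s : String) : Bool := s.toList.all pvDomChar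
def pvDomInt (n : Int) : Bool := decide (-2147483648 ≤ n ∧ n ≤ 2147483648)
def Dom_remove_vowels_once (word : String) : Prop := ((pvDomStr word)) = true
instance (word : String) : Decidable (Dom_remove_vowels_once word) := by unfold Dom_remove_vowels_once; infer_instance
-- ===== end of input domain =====

-- B replaces A's streaming scan with a seen-set by a two-phase plan (first-occurrence
-- index set per vowel, then an index-based filter); objective: alternative (same cost).

-- ===== PORT A =====
-- the vowel constant "aeiouy" as its characters ('char in vowels' on a 1-char value
-- is membership of that character in the string's characters)
def pvVowels : List Char := "aeiouy".toList

-- A's loop body: state = (seen_vowels, result)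
def pvStepA (st : PySem.Set Char × List Char) (c : Char) : PySem.Set Char × List Char :=
  if pvVowels.contains c then
    if !(st.1.contains c) then (st.1.add c, st.2) else (st.1, st.2 ++ [c])
  else (st.1, st.2 ++ [c])

def remove_vowels_once (word : String) : String :=
  String.ofList (word.toList.foldl pvStepA (PySem.Set.empty, [])).2

-- ===== PORT B =====
-- {word.index(v) for v in "aeiouy" if v in word}  (index? is none exactly when v not in word)
def pvDelete (l : List Char) : PySem.Set Int :=
  PySem.Set.ofList (pvVowels.filterMap (fun v => (PySem.List.index? l v).map (fun i => (i : Int))))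

def remove_vowels_once_alt (word : String) : String :=
  let l := word.toList
  let delete : PySem.Set Int := pvDelete l
  String.ofList ((PySem.List.enumerate l).filterMap
    (fun p => if delete.contains p.1 then none else some p.2))

-- ===== PRECONDITION & SPEC =====
def Spec_remove_vowels_once (word : String) (out : String) : Prop := out = remove_vowels_once_alt word
instance (word : String) (out : String) : Decidable (Spec_remove_vowels_once word out) := by unfold Spec_remove_vowels_once; infer_instance

-- ===== CLAIM (what is proved, stated in full; the proofs are below) =====
def Claim_equal_remove_vowels_once : Prop := ∀ (word : String), Dom_remove_vowels_once word → Spec_remove_vowels_once word (remove_vowels_once word)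

-- ===== LEMMAS AND PROOFS =====

-- position |p| of the word p ++ c :: r is a deleted index iff c is a vowel not occurring in p
lemma pvMem_del_iff (p r : List Char) (c : Char) :
    ((p.length : Int) ∈ pvDelete (p ++ c :: r)) ↔ (c ∈ pvVowels ∧ c ∉ p) := by
  unfold pvDelete
  rw [PySem.Set.mem_ofList, List.mem_filterMap]
  constructor
  · rintro ⟨v, hv, hf⟩
    cases hk : PySem.List.index? (p ++ c :: r) v with
    | none => rw [hk] at hf; simp at hf
    | some k =>
      rw [hk] at hf
      have hkl : k = p.length := by
        have : (k : Int) = (p.length : Int) := by simpa using hf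
        exact_mod_cast this
      subst hkl
      rcases (PySem.List.index?_eq_some_iff _ _ _).mp hk with ⟨pre, suf, heq, hlen, hnm⟩
      rcases List.append_inj heq hlen.symm with ⟨hp, ht⟩
      injection ht with h1 _
      subst h1; subst hp
      exact ⟨hv, hnm⟩
  · rintro ⟨hv, hnp⟩
    refine ⟨c, hv, ?_⟩
    have h : PySem.List.index? (p ++ c :: r) c = some p.length :=
      (PySem.List.index?_eq_some_iff _ _ _).mpr ⟨p, r, rfl, rfl, hnp⟩
    rw [h]; rfl

-- loop invariant: after consuming prefix p, A's seen set holds exactly the vowels of p,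
-- and the rest of A's run produces B's index-filter of the suffix
lemma pvKey : ∀ (l p : List Char) (seen : PySem.Set Char) (res : List Char),
    (∀ d : Char, d ∈ seen ↔ (d ∈ pvVowels ∧ d ∈ p)) →
    (l.foldl pvStepA (seen, res)).2
      = res ++ (PySem.List.enumerate l (p.length : Int)).filterMap
          (fun q => if (pvDelete (p ++ l)).contains q.1 then none else some q.2) := by
  intro l
  induction l with
  | nil => intro p seen res _; simp [PySem.List.enumerate_nil]
  | cons c r ih =>
    intro p seen res hinv
    by_cases hv : c ∈ pvVowels
    · by_cases hc : c ∈ p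
      · -- vowel already seen: A keeps it, B's delete set does not contain this index
        have hmem : c ∈ seen := (hinv c).mpr ⟨hv, hc⟩
        have hA : pvStepA (seen, res) c = (seen, res ++ [c]) := by
          simp [pvStepA, hv, hmem]
        have hnd : ((p.length : Int)) ∉ pvDelete (p ++ c :: r) := fun h =>
          ((pvMem_del_iff p r c).mp h).2 hc
        have hinv2 : ∀ d : Char, d ∈ seen ↔ (d ∈ pvVowels ∧ d ∈ p ++ [c]) := by
          intro d; rw [hinv d]
          constructor
          · rintro ⟨h1, h2⟩; exact ⟨h1, List.mem_append_left _ h2⟩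
          · rintro ⟨h1, h2⟩
            rcases List.mem_append.mp h2 with h | h
            · exact ⟨h1, h⟩
            · simp at h; subst h; exact ⟨h1, hc⟩
        rw [List.foldl_cons, hA, ih (p ++ [c]) seen (res ++ [c]) hinv2]
        simp [PySem.List.enumerate_cons, hnd]
      · -- first occurrence of a vowel: A drops it, B deletes this index
        have hns : c ∉ seen := fun h => hc ((hinv c).mp h).2
        have hA : pvStepA (seen, res) c = (seen.add c, res) := by
          simp [pvStepA, hv, hns]
        have hd : ((p.length : Int)) ∈ pvDelete (p ++ c :: r) :=
          (pvMem_del_iff p r c).mpr ⟨hv, hc⟩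
        have hinv2 : ∀ d : Char, d ∈ seen.add c ↔ (d ∈ pvVowels ∧ d ∈ p ++ [c]) := by
          intro d; rw [PySem.Set.mem_add, hinv d]
          constructor
          · rintro (⟨h1, h2⟩ | h)
            · exact ⟨h1, List.mem_append_left _ h2⟩
            · subst h; exact ⟨hv, by simp⟩
          · rintro ⟨h1, h2⟩
            rcases List.mem_append.mp h2 with h | h
            · exact Or.inl ⟨h1, h⟩
            · simp at h; exact Or.inr h
        rw [List.foldl_cons, hA, ih (p ++ [c]) (seen.add c) res hinv2]
        simp [PySem.List.enumerate_cons, hd]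
    · -- not a vowel: A keeps it, and this index cannot be in the delete set
      have hA : pvStepA (seen, res) c = (seen, res ++ [c]) := by
        simp [pvStepA, hv]
      have hnd : ((p.length : Int)) ∉ pvDelete (p ++ c :: r) := fun h =>
        hv ((pvMem_del_iff p r c).mp h).1
      have hinv2 : ∀ d : Char, d ∈ seen ↔ (d ∈ pvVowels ∧ d ∈ p ++ [c]) := by
        intro d; rw [hinv d]
        constructor
        · rintro ⟨h1, h2⟩; exact ⟨h1, List.mem_append_left _ h2⟩
        · rintro ⟨h1, h2⟩
          rcases List.mem_append.mp h2 with h | h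
          · exact ⟨h1, h⟩
          · simp at h; subst h; exact absurd h1 hv
      rw [List.foldl_cons, hA, ih (p ++ [c]) seen (res ++ [c]) hinv2]
      simp [PySem.List.enumerate_cons, hnd]

-- ===== VERDICT (by name: the statement is the Claim_ definition above) =====
theorem remove_vowels_once_spec : Claim_equal_remove_vowels_once := by
  intro word _
  unfold Spec_remove_vowels_once remove_vowels_once remove_vowels_once_alt
  have h := pvKey word.toList [] PySem.Set.empty []
    (by intro d; simp [PySem.Set.empty])
  simp only [List.nil_append, List.length_nil, Nat.cast_zero] at h
  exact congrArg String.ofList h
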